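-- pv_equiv track=rewrite | github.com/Sooyong97/Algorithm | 프로그래머스/1/12930. 이상한 문자 만들기/이상한 문자 만들기.py | solution
-- ===== SOURCE A (Python) =====
-- def solution(s):
--     answer = ''
--     s = list(s)
--     j = 0
--     for i in s:
--         if i == ' ':
--             answer += i
--             j = 0
--             continue
--         elif j % 2 == 0:
--             i = i.upper()
--         else: i = i.lower()
--         answer += i
--         j += 1
--     return answer
-- ===== SOURCE B (Python) =====
-- def solution(s):
--     return ' '.join(
--         ''.join(c.upper() if k % 2 == 0 else c.lower() for k, c in enumerate(word))
--         for word in s.split(' ')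
--     )
-- ===== Notes on version B (the rewrite author's own statement) =====
-- stated objective: idiomatic
-- what changed: Replaces the flat single pass with a running counter and a per-char space special-case by splitting on single spaces into words, transforming each word by its own enumerated index (even upper, odd lower), and rejoining, which round-trips all spacing exactly.
import Mathlib
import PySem

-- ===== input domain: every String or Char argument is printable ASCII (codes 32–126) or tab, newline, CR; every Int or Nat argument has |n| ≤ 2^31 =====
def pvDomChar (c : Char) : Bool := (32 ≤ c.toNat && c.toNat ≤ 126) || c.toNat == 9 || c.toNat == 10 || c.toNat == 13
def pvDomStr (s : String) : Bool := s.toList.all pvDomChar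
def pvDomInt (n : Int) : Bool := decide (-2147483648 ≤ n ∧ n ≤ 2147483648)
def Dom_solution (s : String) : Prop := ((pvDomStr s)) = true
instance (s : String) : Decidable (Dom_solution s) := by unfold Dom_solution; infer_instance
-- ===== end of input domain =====

-- B rewrites A's flat single pass (running counter j, per-char space special-case) as
-- split-into-words / per-word enumerate / rejoin — same values, idiomatic decomposition.

-- ===== PORT A =====
-- the for-loop over the characters with state (answer, j); answer kept as List Char
def solution (s : String) : String :=
  String.ofList
    (s.toList.foldl
      (fun (st : List Char × Int) i =>
        if i = ' ' then (st.1 ++ [i], 0)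
        else if PySem.Int.mod st.2 2 = 0 then (st.1 ++ [PySem.Chars.upperChar i], st.2 + 1)
        else (st.1 ++ [PySem.Chars.lowerChar i], st.2 + 1))
      (([] : List Char), (0 : Int))).1

-- ===== PORT B =====
-- ' '.join(''.join(c.upper() if k % 2 == 0 else c.lower() for k, c in enumerate(word)) for word in s.split(' '))
def solution_alt (s : String) : String :=
  String.ofList (PySem.Chars.join [' ']
    ((PySem.Chars.splitOn s.toList [' ']).map (fun w =>
      PySem.Chars.join []
        ((PySem.List.enumerate w 0).map (fun p =>
          [if PySem.Int.mod p.1 2 = 0 then PySem.Chars.upperChar p.2 else PySem.Chars.lowerChar p.2])))))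

-- ===== PRECONDITION & SPEC =====
def Spec_solution (s : String) (out : String) : Prop := out = solution_alt s
instance (s : String) (out : String) : Decidable (Spec_solution s out) := by unfold Spec_solution; infer_instance

-- ===== CLAIM (what is proved, stated in full; the proofs are below) =====
def Claim_equal_solution : Prop := ∀ (s : String), Dom_solution s → Spec_solution s (solution s)

-- ===== LEMMAS AND PROOFS =====

-- the transformed character at in-word index j
def pvG (j : Int) (c : Char) : Char :=
  if PySem.Int.mod j 2 = 0 then PySem.Chars.upperChar c else PySem.Chars.lowerChar c

-- reference recursion: A's pass, counter made explicit
def pvT : List Char → Int → List Char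
  | [], _ => []
  | c :: t, j => if c = ' ' then ' ' :: pvT t 0 else pvG j c :: pvT t (j + 1)

-- reference recursion for split on a single space, empty pieces kept
def pvSplit : List Char → List (List Char)
  | [] => [[]]
  | c :: t => if c = ' ' then [] :: pvSplit t else (pvSplit t).modifyHead (c :: ·)

-- B's per-word transform (the inner generator, chars enumerated from j)
def pvF (j : Int) (w : List Char) : List Char :=
  (PySem.List.enumerate w j).map (fun p => pvG p.1 p.2)

lemma pvSplit_cons_space (t : List Char) : pvSplit (' ' :: t) = [] :: pvSplit t := by
  simp [pvSplit]

lemma pvSplit_cons_ne {c : Char} (t : List Char) (hc : c ≠ ' ') :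
    pvSplit (c :: t) = (pvSplit t).modifyHead (c :: ·) := by
  simp [pvSplit, hc]

lemma pvT_cons_space (t : List Char) (j : Int) : pvT (' ' :: t) j = ' ' :: pvT t 0 := by
  simp [pvT]

lemma pvT_cons_ne {c : Char} (t : List Char) (j : Int) (hc : c ≠ ' ') :
    pvT (c :: t) j = pvG j c :: pvT t (j + 1) := by
  simp [pvT, hc]

lemma pvSplit_shape (l : List Char) : ∃ w ws, pvSplit l = w :: ws := by
  induction l with
  | nil => exact ⟨[], [], rfl⟩
  | cons c t ih =>
    obtain ⟨w, ws, hw⟩ := ih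
    by_cases hc : c = ' '
    · exact ⟨[], pvSplit t, by simp [pvSplit, hc]⟩
    · exact ⟨c :: w, ws, by simp [pvSplit, hc, hw]⟩

lemma go_spec (fuel : Nat) (l cur : List Char) (acc : List (List Char))
    (h : l.length < fuel) :
    PySem.Chars.splitOn.go [' '] fuel l cur acc
      = acc.reverse ++ (pvSplit l).modifyHead (cur.reverse ++ ·) := by
  induction fuel generalizing l cur acc with
  | zero => omega
  | succ fuel ih =>
    cases l with
    | nil => simp [PySem.Chars.splitOn.go, pvSplit]
    | cons c rest =>
      obtain ⟨w, ws, hw⟩ := pvSplit_shape rest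
      by_cases hc : c = ' '
      · subst hc
        rw [show PySem.Chars.splitOn.go [' '] (fuel + 1) (' ' :: rest) cur acc
              = PySem.Chars.splitOn.go [' '] fuel rest [] (cur.reverse :: acc) by
            simp [PySem.Chars.splitOn.go, List.isPrefixOf]]
        rw [ih rest [] (cur.reverse :: acc) (by simpa using h)]
        simp [pvSplit, hw]
      · rw [show PySem.Chars.splitOn.go [' '] (fuel + 1) (c :: rest) cur acc
              = PySem.Chars.splitOn.go [' '] fuel rest (c :: cur) acc by
            simp [PySem.Chars.splitOn.go, List.isPrefixOf]
            exact fun h => absurd h.symm hc]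
        rw [ih rest (c :: cur) acc (by simpa using h)]
        simp [pvSplit_cons_ne rest hc, hw]

lemma splitOn_space (cs : List Char) : PySem.Chars.splitOn cs [' '] = pvSplit cs := by
  obtain ⟨w, ws, hw⟩ := pvSplit_shape cs
  rw [PySem.Chars.splitOn, go_spec (cs.length + 1) cs [] [] (by omega)]
  simp [hw]

lemma pvF_nil (j : Int) : pvF j [] = [] := by
  simp [pvF, PySem.List.enumerate_nil]

lemma pvF_cons (j : Int) (c : Char) (w : List Char) :
    pvF j (c :: w) = pvG j c :: pvF (j + 1) w := by
  simp [pvF, PySem.List.enumerate_cons]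

-- join of a nonempty list of pieces steps through the first piece's characters
lemma join_cons_char (x : Char) (xs : List Char) (l : List (List Char)) :
    PySem.Chars.join [' '] ((x :: xs) :: l) = x :: PySem.Chars.join [' '] (xs :: l) := by
  cases l with
  | nil => simp [PySem.Chars.join_singleton]
  | cons b l => rw [PySem.Chars.join_cons_cons, PySem.Chars.join_cons_cons]; simp

-- B's join over the split equals A's pass, first word enumerated from j
lemma join_split (t : List Char) (j : Int) :
    PySem.Chars.join [' ']
      (pvF j (pvSplit t).headI :: (pvSplit t).tail.map (pvF 0))
      = pvT t j := by
  induction t generalizing j with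
  | nil => simp [pvSplit, pvF_nil, pvT, PySem.Chars.join_singleton]
  | cons c r ih =>
    obtain ⟨w, ws, hw⟩ := pvSplit_shape r
    by_cases hc : c = ' '
    · subst hc
      have hIH := ih 0
      rw [hw] at hIH
      simp only [List.headI_cons, List.tail_cons] at hIH
      rw [pvSplit_cons_space, List.headI_cons, List.tail_cons, pvF_nil, hw,
        List.map_cons, PySem.Chars.join_cons_cons, hIH, pvT_cons_space]
      simp
    · have hIH := ih (j + 1)
      rw [hw] at hIH
      simp only [List.headI_cons, List.tail_cons] at hIH
      rw [pvSplit_cons_ne r hc, hw, List.modifyHead_cons, List.headI_cons, List.tail_cons,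
        pvF_cons, join_cons_char, hIH, pvT_cons_ne r j hc]

lemma map_eq_headI_tail (t : List Char) (f : List Char → List Char) :
    (pvSplit t).map f = f (pvSplit t).headI :: (pvSplit t).tail.map f := by
  obtain ⟨w, ws, hw⟩ := pvSplit_shape t
  simp [hw]

lemma foldA (t : List Char) (acc : List Char) (j : Int) :
    (t.foldl
      (fun (st : List Char × Int) i =>
        if i = ' ' then (st.1 ++ [i], 0)
        else if PySem.Int.mod st.2 2 = 0 then (st.1 ++ [PySem.Chars.upperChar i], st.2 + 1)
        else (st.1 ++ [PySem.Chars.lowerChar i], st.2 + 1))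
      (acc, j)).1 = acc ++ pvT t j := by
  induction t generalizing acc j with
  | nil => simp [pvT]
  | cons c r ih =>
    simp only [List.foldl_cons]
    by_cases hc : c = ' '
    · rw [if_pos hc, ih, hc, pvT_cons_space]
      simp
    · rw [if_neg hc, pvT_cons_ne r j hc]
      by_cases hj : PySem.Int.mod j 2 = 0
      · rw [if_pos hj, ih]
        simp only [pvG, if_pos hj, List.append_assoc, List.singleton_append]
      · rw [if_neg hj, ih]
        simp only [pvG, if_neg hj, List.append_assoc, List.singleton_append]

lemma inner_word (w : List Char) (j : Int) :
    PySem.Chars.join []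
      ((PySem.List.enumerate w j).map (fun p =>
        [if PySem.Int.mod p.1 2 = 0 then PySem.Chars.upperChar p.2 else PySem.Chars.lowerChar p.2]))
      = pvF j w := by
  have h : (PySem.List.enumerate w j).map (fun p =>
        [if PySem.Int.mod p.1 2 = 0 then PySem.Chars.upperChar p.2 else PySem.Chars.lowerChar p.2])
      = (pvF j w).map (fun c => [c]) := by
    simp [pvF, pvG, List.map_map]
  rw [h, PySem.Chars.join_nil_singletons]

-- ===== VERDICT (by name: the statement is the Claim_ definition above) =====
theorem solution_spec : Claim_equal_solution := by
  intro s _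
  unfold Spec_solution solution solution_alt
  rw [foldA s.toList [] 0, splitOn_space]
  have hmap : (pvSplit s.toList).map (fun w =>
      PySem.Chars.join []
        ((PySem.List.enumerate w 0).map (fun p =>
          [if PySem.Int.mod p.1 2 = 0 then PySem.Chars.upperChar p.2 else PySem.Chars.lowerChar p.2])))
      = (pvSplit s.toList).map (pvF 0) := by
    refine List.map_congr_left ?_
    intro w _
    exact inner_word w 0
  rw [hmap, map_eq_headI_tail, join_split]
  simp
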